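-- pv_equiv track=rewrite | github.com/sofiaoreis/lithium-slicer | app/utils.py | get_testname_expected_msg
-- ===== SOURCE A (Python) =====
-- def get_testname_expected_msg(testname, expected):
--     test_found = False; res = []
--     for i in expected:
--         if testname in i and test_found:
--             test_found = False
--         if testname in i:
--             test_found = True
--         if test_found:
--             res.append(i)
--     return res
-- ===== SOURCE B (Python) =====
-- def get_testname_expected_msg(testname, expected):
--     for idx, line in enumerate(expected):
--         if testname in line:
--             return list(expected[idx:])
--     return []
-- ===== Notes on version B (the rewrite author's own statement) =====
-- stated objective: simpler
-- what changed: A's per-line flag never resets once set, so B replaces the stateful accumulation loop with find-first-matching-index then return the slice from there.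
import Mathlib
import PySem

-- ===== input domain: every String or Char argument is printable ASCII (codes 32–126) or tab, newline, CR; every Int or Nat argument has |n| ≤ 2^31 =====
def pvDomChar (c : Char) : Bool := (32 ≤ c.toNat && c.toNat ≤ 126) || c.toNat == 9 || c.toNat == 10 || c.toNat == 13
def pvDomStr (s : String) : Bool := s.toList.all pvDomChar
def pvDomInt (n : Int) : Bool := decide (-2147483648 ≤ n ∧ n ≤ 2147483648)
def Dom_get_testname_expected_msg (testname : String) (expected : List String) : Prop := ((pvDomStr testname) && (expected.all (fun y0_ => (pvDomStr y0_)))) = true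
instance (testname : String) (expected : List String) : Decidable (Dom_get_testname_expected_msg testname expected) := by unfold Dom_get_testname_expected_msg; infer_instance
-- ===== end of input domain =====

-- B replaces A's stateful flag-and-append loop (whose flag, once set, never resets)
-- by find-first-matching-index then the slice from there; return value only, no mutation.

-- ===== PORT A =====
def pvStepA (testname : String) (st : Bool × List String) (i : String) : Bool × List String :=
  let test_found := if PySem.Str.isIn testname i && st.1 then false else st.1
  let test_found := if PySem.Str.isIn testname i then true else test_found
  (test_found, if test_found then st.2 ++ [i] else st.2)

def get_testname_expected_msg (testname : String) (expected : List String) : List String :=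
  (expected.foldl (pvStepA testname) (false, [])).2

-- ===== PORT B =====
def get_testname_expected_msg_alt (testname : String) (expected : List String) : List String :=
  match expected.findIdx? (fun line => PySem.Str.isIn testname line) with
  | some idx => PySem.List.slice expected (some (idx : Int)) none
  | none => []

-- ===== PRECONDITION & SPEC =====
def Spec_get_testname_expected_msg (testname : String) (expected : List String) (out : List String) : Prop := out = get_testname_expected_msg_alt testname expected
instance (testname : String) (expected : List String) (out : List String) : Decidable (Spec_get_testname_expected_msg testname expected out) := by unfold Spec_get_testname_expected_msg; infer_instance

-- ===== CLAIM (what is proved, stated in full; the proofs are below) =====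
def Claim_equal_get_testname_expected_msg : Prop := ∀ (testname : String) (expected : List String), Dom_get_testname_expected_msg testname expected → Spec_get_testname_expected_msg testname expected (get_testname_expected_msg testname expected)

-- ===== LEMMAS AND PROOFS =====

/-- The common characterisation: the suffix of the list from the first line containing `testname`. -/
def pvSuffixFrom (testname : String) : List String → List String
  | [] => []
  | x :: xs => if PySem.Str.isIn testname x then x :: xs else pvSuffixFrom testname xs

lemma pvFoldA_true (testname : String) (xs : List String) (res : List String) :
    xs.foldl (pvStepA testname) (true, res) = (true, res ++ xs) := by
  induction xs generalizing res with
  | nil => simp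
  | cons x xs ih =>
    simp only [List.foldl_cons, pvStepA]
    cases h : PySem.Str.isIn testname x <;> simp [ih]

lemma pvFoldA_false (testname : String) (xs : List String) (res : List String) :
    (xs.foldl (pvStepA testname) (false, res)).2 = res ++ pvSuffixFrom testname xs := by
  induction xs generalizing res with
  | nil => simp [pvSuffixFrom]
  | cons x xs ih =>
    simp only [List.foldl_cons, pvStepA, pvSuffixFrom]
    cases h : PySem.Str.isIn testname x
    · simpa [h] using ih res
    · simp [pvFoldA_true]

lemma pvAlt_eq (testname : String) (xs : List String) :
    get_testname_expected_msg_alt testname xs = pvSuffixFrom testname xs := by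
  induction xs with
  | nil => simp [get_testname_expected_msg_alt, pvSuffixFrom]
  | cons x xs ih =>
    simp only [get_testname_expected_msg_alt, pvSuffixFrom, List.findIdx?_cons,
      PySem.Str.isIn_eq, PySem.List.slice_from_natCast] at ih ⊢
    by_cases h : PySem.Chars.isIn testname.toList x.toList = true
    case neg =>
      simp only [if_neg h]
      cases hf : List.findIdx? (fun line => PySem.Chars.isIn testname.toList line.toList) xs with
      | none => simpa [hf] using ih
      | some idx =>
        simp only [hf, Option.map_some, List.drop_succ_cons] at ih ⊢
        exact ih
    case pos => simp [h]

-- ===== VERDICT (by name: the statement is the Claim_ definition above) =====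
theorem get_testname_expected_msg_spec : Claim_equal_get_testname_expected_msg := by
  intro testname expected _
  show get_testname_expected_msg testname expected = get_testname_expected_msg_alt testname expected
  rw [get_testname_expected_msg, pvFoldA_false, pvAlt_eq, List.nil_append]
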